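-- pv_equiv track=rewrite | github.com/Laboratoire-de-Chemoinformatique/SynPlanner | synplan/utils/tree_visualization/layout.py | compute_subtree_leaf_counts
-- ===== SOURCE A (Python) =====
-- def sorted_children(children_map: dict[int, list[int]], node_id: int) -> list[int]:
--     return children_map.get(node_id, [])
--
-- def compute_subtree_leaf_counts(
--     children_map: dict[int, list[int]], root_id: int = 1
-- ) -> dict[int, int]:
--     order: list[int] = []
--     if root_id not in children_map:
--         return {}
--
--     stack = [root_id]
--     while stack:
--         node_id = stack.pop()
--         order.append(node_id)
--         stack.extend(sorted_children(children_map, node_id))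
--
--     leaf_counts: dict[int, int] = {}
--     for node_id in reversed(order):
--         children = sorted_children(children_map, node_id)
--         leaf_counts[node_id] = (
--             1 if not children else sum(leaf_counts[child] for child in children)
--         )
--     return leaf_counts
-- ===== SOURCE B (Python) =====
-- def compute_subtree_leaf_counts(children_map, root_id=1):
--     if root_id not in children_map:
--         return {}
--     leaf_counts = {}
--
--     def count(node):
--         children = children_map.get(node, [])
--         total = 1 if not children else sum(count(child) for child in children)
--         leaf_counts[node] = total
--         return total
--
--     count(root_id)
--     return leaf_counts
-- ===== Notes on version B (the rewrite author's own statement) =====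
-- stated objective: simpler
-- what changed: Replaces A's two passes (explicit-stack preorder traversal into an order list, then a reverse sweep summing from a dict) by a single post-order recursion that computes and stores each subtree's leaf count directly; Pre_ excludes exactly the children maps with a cycle reachable from the root, on which A's while-loop never returns (and B's recursion never terminates either).
import Mathlib
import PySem

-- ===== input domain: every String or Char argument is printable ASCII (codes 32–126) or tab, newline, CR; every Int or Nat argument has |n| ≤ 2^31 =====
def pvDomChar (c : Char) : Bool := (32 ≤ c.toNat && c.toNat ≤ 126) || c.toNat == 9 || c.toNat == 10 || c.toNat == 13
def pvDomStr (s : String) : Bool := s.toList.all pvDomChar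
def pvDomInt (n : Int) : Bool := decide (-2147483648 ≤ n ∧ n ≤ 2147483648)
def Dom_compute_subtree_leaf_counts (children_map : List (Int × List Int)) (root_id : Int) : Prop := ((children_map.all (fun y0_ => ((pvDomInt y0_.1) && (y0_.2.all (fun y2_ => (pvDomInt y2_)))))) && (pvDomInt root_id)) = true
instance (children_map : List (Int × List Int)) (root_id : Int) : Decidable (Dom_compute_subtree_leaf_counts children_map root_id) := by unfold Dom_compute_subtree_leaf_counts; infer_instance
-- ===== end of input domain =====

-- B replaces A's two passes (stack preorder into `order`, then a reverse sweep) by one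
-- post-order recursion storing each subtree's leaf count directly (objective: simpler).

-- ===== PORT A =====
-- helper `sorted_children`: children_map.get(node_id, [])
def sorted_children (children_map : List (Int × List Int)) (node_id : Int) : List Int :=
  (PySem.Dict.mk children_map).getD node_id []

-- A's while-loop, fuel-counted (fuel only makes the loop total; it is never exhausted under
-- Pre_). The stack is stored TOP-FIRST: Python's stack.pop() takes the LAST element and
-- stack.extend(cs) appends, which top-first is 'pop the head, push cs reversed at the front'.
def cslOrder (m : List (Int × List Int)) : Nat → List Int → List Int → List Int
  | 0, _, order => order
  | f + 1, stack, order =>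
    match stack with
    | [] => order
    | n :: rest => cslOrder m f ((sorted_children m n).reverse ++ rest) (order ++ [n])

-- fuel: (max children-list length + 1)^(number of entries + 1) bounds the traversal size
def cslFuel (m : List (Int × List Int)) : Nat :=
  ((m.map (fun p => p.2.length)).foldl Nat.max 0 + 1) ^ (m.length + 1)

-- body of A's second loop: leaf_counts[node_id] = 1 if not children else sum(leaf_counts[c]…)
-- (leaf_counts[child]: whenever the first loop ran to completion every child is already
-- present, so getD's default 0 is never used; Python's KeyError cannot occur there)
def cslStep (m : List (Int × List Int)) (lc : PySem.Dict Int Int) (n : Int) : PySem.Dict Int Int :=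
  let cs := sorted_children m n
  lc.insert n (if cs = [] then 1 else cs.foldl (fun a c => a + lc.getD c 0) 0)

def compute_subtree_leaf_counts (children_map : List (Int × List Int)) (root_id : Int) : List (Int × Int) :=
  if (PySem.Dict.mk children_map).contains root_id = false then []
  else
    let order := cslOrder children_map (cslFuel children_map) [root_id] []
    (order.reverse.foldl (cslStep children_map) PySem.Dict.empty).items

-- ===== PORT B =====
-- B's recursive helper `count`, threading the shared leaf_counts dict; the Nat fuel only
-- makes the recursion total (Python's recursion depth), never exhausted under Pre_.
def cslCount (m : List (Int × List Int)) : Nat → Int → PySem.Dict Int Int → Int × PySem.Dict Int Int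
  | 0, _, lc => (0, lc)
  | f + 1, node, lc =>
    let children := (PySem.Dict.mk m).getD node []
    if children = [] then (1, lc.insert node 1)
    else
      let p := children.foldl
        (fun (p : Int × PySem.Dict Int Int) c =>
          let r := cslCount m f c p.2
          (p.1 + r.1, r.2)) (0, lc)
      (p.1, p.2.insert node p.1)

def compute_subtree_leaf_counts_alt (children_map : List (Int × List Int)) (root_id : Int) : List (Int × Int) :=
  if (PySem.Dict.mk children_map).contains root_id = false then []
  else (cslCount children_map (children_map.length + 1) root_id PySem.Dict.empty).2.items

-- ===== PRECONDITION & SPEC =====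
-- node's children as the dict lookup both programs perform (used by Pre_ and the proofs)
def cslG (m : List (Int × List Int)) (n : Int) : List Int :=
  (PySem.Dict.mk m).getD n []

-- nodes reachable from `s` in at most k edge steps (edge = parent to listed child),
-- computed as an iterated closure; after m.length + 1 rounds it is the full reachable set
def cslReachN (m : List (Int × List Int)) : Nat → List Int → List Int
  | 0, s => s
  | k + 1, s => ((cslReachN m k s) ++ (cslReachN m k s).flatMap (fun n => cslG m n)).dedup

def cslReach (m : List (Int × List Int)) (s : List Int) : List Int :=
  cslReachN m (m.length + 1) s

-- Pre_ excludes exactly the children maps with a cycle reachable from the root (a key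
-- reachable from root_id that is also reachable from its own children): there A's while
-- loop never terminates (it returns no value), and B's recursion does not terminate either.
-- The reachable-set computation is a graph property of the input, not either algorithm.
def Pre_compute_subtree_leaf_counts (children_map : List (Int × List Int)) (root_id : Int) : Prop :=
  (PySem.Dict.mk children_map).contains root_id = false ∨
    ∀ p ∈ children_map, p.1 ∈ cslReach children_map [root_id] →
      p.1 ∉ cslReach children_map (cslG children_map p.1)
instance (children_map : List (Int × List Int)) (root_id : Int) : Decidable (Pre_compute_subtree_leaf_counts children_map root_id) := by
  unfold Pre_compute_subtree_leaf_counts; infer_instance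

def pvWitness_compute_subtree_leaf_counts : (List (Int × List Int)) × Int :=
  ([(1, [2, 3]), (2, [4, 5]), (3, [6])], 1)

def Spec_compute_subtree_leaf_counts (children_map : List (Int × List Int)) (root_id : Int) (out : List (Int × Int)) : Prop := out = compute_subtree_leaf_counts_alt children_map root_id
instance (children_map : List (Int × List Int)) (root_id : Int) (out : List (Int × Int)) : Decidable (Spec_compute_subtree_leaf_counts children_map root_id out) := by unfold Spec_compute_subtree_leaf_counts; infer_instance

-- ===== CLAIM (what is proved, stated in full; the proofs are below) =====
def Claim_equal_compute_subtree_leaf_counts : Prop := ∀ (children_map : List (Int × List Int)) (root_id : Int), Dom_compute_subtree_leaf_counts children_map root_id → Pre_compute_subtree_leaf_counts children_map root_id → Spec_compute_subtree_leaf_counts children_map root_id (compute_subtree_leaf_counts children_map root_id)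

-- ===== LEMMAS AND PROOFS =====

-- abstract reachability along the parent-to-child edges
def cslRT (m : List (Int × List Int)) (a b : Int) : Prop :=
  Relation.ReflTransGen (fun x y => y ∈ cslG m x) a b

theorem cslG_mem (m : List (Int × List Int)) (n : Int) (h : cslG m n ≠ []) :
    (n, cslG m n) ∈ m := by
  unfold cslG at *
  rw [PySem.Dict.getD_eq_get?_getD] at *
  cases hg : (PySem.Dict.mk m).get? n with
  | none => rw [hg] at h; simp at h
  | some cs =>
    simp only [Option.getD_some]
    exact PySem.Dict.mem_items_of_get?_eq_some _ hg

-- ---- the computational closure reaches everything abstractly reachable ----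

def cslK (m : List (Int × List Int)) : Finset Int := (m.map Prod.fst).toFinset

theorem cslK_of_child (m : List (Int × List Int)) {p x : Int} (h : x ∈ cslG m p) :
    p ∈ cslK m := by
  have hne : cslG m p ≠ [] := by intro h0; rw [h0] at h; simp at h
  exact List.mem_toFinset.mpr (List.mem_map.mpr ⟨(p, cslG m p), cslG_mem m p hne, rfl⟩)

def cslF (m : List (Int × List Int)) (s : List Int) (k : Nat) : Finset Int :=
  (cslK m).filter (fun x => x ∈ cslReachN m k s)

theorem cslReachN_succ_mem (m : List (Int × List Int)) (s : List Int) (k : Nat) (x : Int) :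
    x ∈ cslReachN m (k + 1) s ↔
      x ∈ cslReachN m k s ∨ ∃ p ∈ cslReachN m k s, x ∈ cslG m p := by
  simp [cslReachN, List.mem_dedup, List.mem_append, List.mem_flatMap]

theorem cslReachN_mono (m : List (Int × List Int)) (s : List Int) (k : Nat) {x : Int}
    (h : x ∈ cslReachN m k s) : x ∈ cslReachN m (k + 1) s :=
  (cslReachN_succ_mem m s k x).mpr (Or.inl h)

theorem cslStep_keys (m : List (Int × List Int)) (s : List Int) (k : Nat) (x : Int) :
    x ∈ cslReachN m (k + 1) s ↔
      x ∈ cslReachN m k s ∨ ∃ p ∈ cslF m s k, x ∈ cslG m p := by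
  rw [cslReachN_succ_mem]
  constructor
  · rintro (h | ⟨p, hp, hc⟩)
    · exact Or.inl h
    · exact Or.inr ⟨p, Finset.mem_filter.mpr ⟨cslK_of_child m hc, by simpa using hp⟩, hc⟩
  · rintro (h | ⟨p, hp, hc⟩)
    · exact Or.inl h
    · exact Or.inr ⟨p, by simpa using (Finset.mem_filter.mp hp).2, hc⟩

theorem cslF_mono (m : List (Int × List Int)) (s : List Int) (k : Nat) :
    cslF m s k ⊆ cslF m s (k + 1) := by
  intro x hx
  rw [cslF, Finset.mem_filter] at *
  exact ⟨hx.1, by simpa using cslReachN_mono m s k (by simpa using hx.2)⟩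

theorem cslStab_S (m : List (Int × List Int)) (s : List Int) (k : Nat)
    (h : cslF m s k = cslF m s (k + 1)) (x : Int) :
    x ∈ cslReachN m (k + 2) s ↔ x ∈ cslReachN m (k + 1) s := by
  constructor
  · intro hx
    rcases (cslStep_keys m s (k + 1) x).mp hx with h1 | ⟨p, hp, hc⟩
    · exact h1
    · rw [← h] at hp
      exact (cslStep_keys m s k x).mpr (Or.inr ⟨p, hp, hc⟩)
  · exact cslReachN_mono m s (k + 1)

theorem cslStab_forward (m : List (Int × List Int)) (s : List Int) (k : Nat)
    (h : cslF m s k = cslF m s (k + 1)) :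
    ∀ j, (cslF m s (k + j) = cslF m s k) ∧
      (∀ x, x ∈ cslReachN m (k + 1 + j) s ↔ x ∈ cslReachN m (k + 1) s) := by
  intro j
  induction j with
  | zero => exact ⟨rfl, fun x => Iff.rfl⟩
  | succ i ih =>
    obtain ⟨hF, hS⟩ := ih
    have hF' : cslF m s (k + (i + 1)) = cslF m s k := by
      have : cslF m s (k + i + 1) = cslF m s (k + 1) := by
        apply Finset.ext
        intro x
        simp only [cslF, Finset.mem_filter]
        constructor
        · rintro ⟨h1, h2⟩; exact ⟨h1, by simpa using (hS x).mp (by simpa [Nat.add_assoc, Nat.add_comm 1 i] using h2)⟩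
        · rintro ⟨h1, h2⟩; exact ⟨h1, by simpa [Nat.add_assoc, Nat.add_comm 1 i] using (hS x).mpr (by simpa using h2)⟩
      calc cslF m s (k + (i + 1)) = cslF m s (k + i + 1) := by ring_nf
        _ = cslF m s (k + 1) := this
        _ = cslF m s k := h.symm
    refine ⟨hF', fun x => ?_⟩
    have hkk : cslF m s (k + i) = cslF m s (k + i + 1) := by
      rw [hF]; rw [show k + i + 1 = k + (i + 1) by ring, hF']
    have := cslStab_S m s (k + i) hkk x
    have heq1 : k + 1 + (i + 1) = k + i + 2 := by ring
    have heq2 : k + 1 + i = k + i + 1 := by ring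
    rw [heq1, this, ← heq2, hS x]

theorem cslExists_stab (m : List (Int × List Int)) (s : List Int) :
    ∃ k ≤ m.length, cslF m s k = cslF m s (k + 1) := by
  by_contra hcon
  push Not at hcon
  have hgrow : ∀ j, j ≤ m.length + 1 → j ≤ (cslF m s j).card := by
    intro j
    induction j with
    | zero => intro _; omega
    | succ i ih =>
      intro hle
      have hne : cslF m s i ≠ cslF m s (i + 1) := hcon i (by omega)
      have hlt : (cslF m s i).card < (cslF m s (i + 1)).card :=
        Finset.card_lt_card (lt_of_le_of_ne (cslF_mono m s i) hne)
      have := ih (by omega)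
      omega
  have h1 : m.length + 1 ≤ (cslF m s (m.length + 1)).card := hgrow _ le_rfl
  have h2 : (cslF m s (m.length + 1)).card ≤ (cslK m).card := Finset.card_filter_le _ _
  have h3 : (cslK m).card ≤ m.length := by
    calc (cslK m).card ≤ (m.map Prod.fst).length := List.toFinset_card_le _
      _ = m.length := List.length_map ..
  omega

theorem cslReach_closed (m : List (Int × List Int)) (s : List Int) {p x : Int}
    (hp : p ∈ cslReach m s) (hx : x ∈ cslG m p) : x ∈ cslReach m s := by
  obtain ⟨k, hk, hF⟩ := cslExists_stab m s
  obtain ⟨j, hj⟩ : ∃ j, m.length + 1 = k + 1 + j := ⟨m.length - k, by omega⟩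
  have hS := (cslStab_forward m s k hF j).2
  have hp1 : p ∈ cslReachN m (k + 1) s := (hS p).mp (by rw [← hj]; exact hp)
  have hpF : p ∈ cslF m s (k + 1) :=
    Finset.mem_filter.mpr ⟨cslK_of_child m hx, by simpa using hp1⟩
  have hx2 : x ∈ cslReachN m (k + 2) s :=
    (cslStep_keys m s (k + 1) x).mpr (Or.inr ⟨p, by rw [← hF]; rwa [hF], hx⟩)
  have hx1 : x ∈ cslReachN m (k + 1) s := by
    have := (cslStab_forward m s k hF 1).2 x
    rw [show k + 1 + 1 = k + 2 by ring] at this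
    exact this.mp hx2
  rw [cslReach, hj]
  exact (hS x).mpr hx1

theorem cslReach_seed (m : List (Int × List Int)) (s : List Int) {a : Int} (ha : a ∈ s) :
    a ∈ cslReach m s := by
  have : ∀ k, a ∈ cslReachN m k s := by
    intro k
    induction k with
    | zero => exact ha
    | succ i ih => exact cslReachN_mono m s i ih
  exact this _

theorem cslReach_complete (m : List (Int × List Int)) (s : List Int) {a b : Int}
    (h : cslRT m a b) (ha : a ∈ cslReach m s) : b ∈ cslReach m s := by
  induction h with
  | refl => exact ha
  | tail _ h2 ih => exact cslReach_closed m s ih h2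

-- ---- termination measure: number of keys abstractly reachable from a node ----

noncomputable def cslMu (m : List (Int × List Int)) (n : Int) : Nat :=
  Set.ncard {k : Int | k ∈ m.map Prod.fst ∧ cslRT m n k}

theorem cslRT_child (m : List (Int × List Int)) {r n c : Int}
    (hn : cslRT m r n) (hc : c ∈ cslG m n) : cslRT m r c :=
  Relation.ReflTransGen.tail hn hc

theorem cslMu_child (m : List (Int × List Int)) {r : Int}
    (habs : ∀ n c, cslRT m r n → c ∈ cslG m n → ¬ cslRT m c n) {n c : Int}
    (hn : cslRT m r n) (hc : c ∈ cslG m n) :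
    cslMu m c < cslMu m n := by
  have hfin : {k : Int | k ∈ m.map Prod.fst ∧ cslRT m n k}.Finite :=
    Set.Finite.subset (m.map Prod.fst).finite_toSet (fun k hk => hk.1)
  apply Set.ncard_lt_ncard ?_ hfin
  rw [Set.ssubset_def]
  constructor
  · intro k hk
    exact ⟨hk.1, Relation.ReflTransGen.head hc hk.2⟩
  · intro hsub
    have hnkey : n ∈ m.map Prod.fst := by
      have := cslK_of_child m hc
      simpa [cslK, List.mem_toFinset] using this
    have hnB : n ∈ {k : Int | k ∈ m.map Prod.fst ∧ cslRT m n k} :=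
      ⟨hnkey, Relation.ReflTransGen.refl⟩
    have hnA := hsub hnB
    exact habs n c hn hc hnA.2

theorem cslMu_le (m : List (Int × List Int)) (n : Int) : cslMu m n ≤ m.length := by
  calc cslMu m n ≤ Set.ncard {k : Int | k ∈ m.map Prod.fst} := by
        apply Set.ncard_le_ncard (fun k hk => hk.1) (m.map Prod.fst).finite_toSet
    _ = (m.map Prod.fst).toFinset.card := by
        rw [show {k : Int | k ∈ m.map Prod.fst} = ((m.map Prod.fst).toFinset : Set Int) by
          ext x; simp, Set.ncard_eq_toFinset_card', Finset.toFinset_coe]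
    _ ≤ (m.map Prod.fst).length := List.toFinset_card_le _
    _ = m.length := List.length_map ..

-- ---- post-order sequence and true counts, fuel-indexed ----

def cslSeq (m : List (Int × List Int)) : Nat → Int → List Int
  | 0, _ => []
  | f + 1, n => ((cslG m n).map (cslSeq m f)).flatten ++ [n]

def cslCnt (m : List (Int × List Int)) : Nat → Int → Int
  | 0, _ => 0
  | f + 1, n =>
    let cs := cslG m n
    if cs = [] then 1 else cs.foldl (fun a c => a + cslCnt m f c) 0

def cslD (m : List (Int × List Int)) : Nat := m.length + 1
def cslL (m : List (Int × List Int)) : Nat := (m.map (fun p => p.2.length)).foldl Nat.max 0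

-- every key present in lc already holds its true leaf count
def cslGood (m : List (Int × List Int)) (lc : PySem.Dict Int Int) : Prop :=
  ∀ x v, lc.get? x = some v → v = cslCnt m (cslD m) x

theorem cslSeq_stab (m : List (Int × List Int)) {r : Int}
    (habs : ∀ n c, cslRT m r n → c ∈ cslG m n → ¬ cslRT m c n) :
    ∀ f f' n, cslRT m r n → cslMu m n < f → cslMu m n < f' → cslSeq m f n = cslSeq m f' n := by
  intro f
  induction f with
  | zero => intro f' n _ h; omega
  | succ a ih =>
    intro f' n hn h h'
    cases f' with
    | zero => omega
    | succ b =>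
      simp only [cslSeq]
      congr 1
      congr 1
      apply List.map_congr_left
      intro c hc
      have hcm := cslMu_child m habs hn hc
      exact ih b c (cslRT_child m hn hc) (by omega) (by omega)

theorem cslCnt_stab (m : List (Int × List Int)) {r : Int}
    (habs : ∀ n c, cslRT m r n → c ∈ cslG m n → ¬ cslRT m c n) :
    ∀ f f' n, cslRT m r n → cslMu m n < f → cslMu m n < f' → cslCnt m f n = cslCnt m f' n := by
  intro f
  induction f with
  | zero => intro f' n _ h; omega
  | succ a ih =>
    intro f' n hn h h'
    cases f' with
    | zero => omega
    | succ b =>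
      simp only [cslCnt]
      by_cases hcs : cslG m n = []
      · simp [hcs]
      · simp only [hcs, ite_false]
        apply PySem.List.foldl_congr_mem
        intro acc c hc
        have hcm := cslMu_child m habs hn hc
        rw [ih b c (cslRT_child m hn hc) (by omega) (by omega)]

theorem cslSeq_ne_nil (m : List (Int × List Int)) (f : Nat) (n : Int) (h : 0 < f) :
    cslSeq m f n ≠ [] := by
  cases f with
  | zero => omega
  | succ a => simp [cslSeq]

theorem cslRev (m : List (Int × List Int)) {r : Int}
    (habs : ∀ n c, cslRT m r n → c ∈ cslG m n → ¬ cslRT m c n) (n : Int) (hn : cslRT m r n) :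
    (cslSeq m (cslD m) n).reverse
      = n :: ((cslG m n).reverse.map (fun c => (cslSeq m (cslD m) c).reverse)).flatten := by
  by_cases hcs : cslG m n = []
  · simp [cslD, cslSeq, hcs]
  · show (cslSeq m (m.length + 1) n).reverse = _
    simp only [cslSeq, List.reverse_append, List.reverse_cons, List.reverse_nil,
      List.nil_append, List.singleton_append]
    congr 1
    rw [List.reverse_flatten, List.map_reverse, List.map_map, ← List.map_reverse]
    conv_rhs => rw [← List.map_reverse]
    congr 1
    apply List.map_congr_left
    intro c hc
    rw [List.mem_reverse] at hc
    have hlt : cslMu m c < cslMu m n := cslMu_child m habs hn hc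
    have hle : cslMu m n ≤ m.length := cslMu_le m n
    simp only [Function.comp]
    rw [cslSeq_stab m habs m.length (cslD m) c (cslRT_child m hn hc) (by omega)
      (by simp [cslD]; omega)]

theorem sorted_children_eq (m : List (Int × List Int)) (n : Int) :
    sorted_children m n = cslG m n := rfl

theorem cslOrder_eq (m : List (Int × List Int)) {r : Int}
    (habs : ∀ n c, cslRT m r n → c ∈ cslG m n → ¬ cslRT m c n) :
    ∀ f (stack acc : List Int), (∀ x ∈ stack, cslRT m r x) →
      ((stack.map (fun x => (cslSeq m (cslD m) x).reverse)).flatten).length ≤ f →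
      cslOrder m f stack acc
        = acc ++ (stack.map (fun x => (cslSeq m (cslD m) x).reverse)).flatten := by
  intro f
  induction f with
  | zero =>
    intro stack acc _ h
    cases stack with
    | nil => simp [cslOrder]
    | cons n rest =>
      exfalso
      have : cslSeq m (cslD m) n ≠ [] := cslSeq_ne_nil m _ n (by simp [cslD])
      simp only [List.map_cons, List.flatten_cons, List.length_append,
        List.length_reverse] at h
      have := List.length_pos_iff.mpr this
      omega
  | succ a ih =>
    intro stack acc hst h
    cases stack with
    | nil => simp [cslOrder]
    | cons n rest =>
      have hn : cslRT m r n := hst n (by simp)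
      show cslOrder m a ((sorted_children m n).reverse ++ rest) (acc ++ [n]) = _
      rw [sorted_children_eq]
      rw [ih ((cslG m n).reverse ++ rest) (acc ++ [n]) ?hmem ?hlen]
      · simp only [List.map_cons, List.flatten_cons, List.map_append, List.flatten_append,
          cslRev m habs n hn]
        simp [List.append_assoc]
      case hmem =>
        intro x hx
        rcases List.mem_append.mp hx with hx | hx
        · rw [List.mem_reverse] at hx
          exact cslRT_child m hn hx
        · exact hst x (by simp [hx])
      case hlen =>
        simp only [List.map_cons, List.flatten_cons, List.length_append] at h
        rw [cslRev m habs n hn] at h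
        simp only [List.length_cons, List.map_append, List.flatten_append,
          List.length_append] at *
        omega

theorem cslG_len (m : List (Int × List Int)) (n : Int) : (cslG m n).length ≤ cslL m := by
  by_cases hcs : cslG m n = []
  · simp [hcs]
  · have hmem := cslG_mem m n hcs
    have : (cslG m n).length ∈ m.map (fun p => p.2.length) :=
      List.mem_map.mpr ⟨(n, cslG m n), hmem, rfl⟩
    exact (PySem.List.le_foldl_max _ 0).2 _ this

theorem cslSeq_len (m : List (Int × List Int)) :
    ∀ f n, (cslSeq m f n).length ≤ (cslL m + 1) ^ f := by
  intro f
  induction f with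
  | zero => intro n; simp [cslSeq]
  | succ a ih =>
    intro n
    simp only [cslSeq, List.length_append, List.length_cons, List.length_nil,
      List.length_flatten, List.map_map]
    have hsum : ((cslG m n).map (List.length ∘ cslSeq m a)).sum
        ≤ ((cslG m n).map (List.length ∘ cslSeq m a)).length • ((cslL m + 1) ^ a) := by
      apply List.sum_le_card_nsmul
      intro x hx
      obtain ⟨c, _, rfl⟩ := List.mem_map.mp hx
      exact ih c
    rw [List.length_map, smul_eq_mul] at hsum
    have hcl : (cslG m n).length ≤ cslL m := cslG_len m n
    have hone : 1 ≤ (cslL m + 1) ^ a := Nat.one_le_pow _ _ (by omega)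
    have : (cslG m n).length * (cslL m + 1) ^ a ≤ cslL m * (cslL m + 1) ^ a :=
      Nat.mul_le_mul_right _ hcl
    have hpow : (cslL m + 1) ^ (a + 1) = cslL m * (cslL m + 1) ^ a + (cslL m + 1) ^ a := by
      rw [pow_succ]; ring
    omega

theorem cslMain (m : List (Int × List Int)) {r : Int}
    (habs : ∀ n c, cslRT m r n → c ∈ cslG m n → ¬ cslRT m c n) :
    ∀ f n lc, cslRT m r n → cslMu m n < f → cslGood m lc →
      cslCount m f n lc
          = (cslCnt m (cslD m) n, (cslSeq m f n).foldl (cslStep m) lc)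
      ∧ cslGood m ((cslSeq m f n).foldl (cslStep m) lc)
      ∧ (∀ x, lc.contains x = true →
            ((cslSeq m f n).foldl (cslStep m) lc).contains x = true)
      ∧ ((cslSeq m f n).foldl (cslStep m) lc).contains n = true := by
  intro f
  induction f with
  | zero => intro n lc _ h; omega
  | succ a ih =>
    intro n lc hn h hg
    by_cases hcs : cslG m n = []
    · -- leaf: both sides insert n ↦ 1
      have hseq : (cslSeq m (a + 1) n).foldl (cslStep m) lc = lc.insert n 1 := by
        simp only [cslSeq, hcs, List.map_nil, List.flatten_nil, List.nil_append,
          List.foldl_cons, List.foldl_nil, cslStep, sorted_children_eq, if_pos]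
      have hcnt : cslCnt m (cslD m) n = 1 := by
        show cslCnt m (m.length + 1) n = 1
        simp [cslCnt, hcs]
      have hcount : cslCount m (a + 1) n lc = (1, lc.insert n 1) := by
        show (if cslG m n = [] then _ else _) = _
        rw [if_pos hcs]
      refine ⟨?_, ?_, ?_, ?_⟩
      · rw [hcount, hseq, hcnt]
      · rw [hseq]
        intro x v hx
        rw [PySem.Dict.get?_insert] at hx
        split at hx
        · rename_i hxn; cases hx; rw [hxn, hcnt]
        · exact hg x v hx
      · intro x hx
        rw [hseq, PySem.Dict.contains_insert, hx, Bool.or_true]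
      · rw [hseq, PySem.Dict.contains_insert]; simp
    · -- internal node
      have hmu : cslMu m n ≤ a := by omega
      have hmuc : ∀ c ∈ cslG m n, cslRT m r c ∧ cslMu m c < a :=
        fun c hc => ⟨cslRT_child m hn hc,
          lt_of_lt_of_le (cslMu_child m habs hn hc) hmu⟩
      have inner : ∀ l : List Int, (∀ c ∈ l, cslRT m r c ∧ cslMu m c < a) →
          ∀ (s : Int) (lc0 : PySem.Dict Int Int), cslGood m lc0 →
          (l.foldl (fun (p : Int × PySem.Dict Int Int) c =>
              let r := cslCount m a c p.2; (p.1 + r.1, r.2)) (s, lc0)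
            = (l.foldl (fun acc c => acc + cslCnt m (cslD m) c) s,
               ((l.map (cslSeq m a)).flatten).foldl (cslStep m) lc0))
          ∧ cslGood m (((l.map (cslSeq m a)).flatten).foldl (cslStep m) lc0)
          ∧ (∀ x, lc0.contains x = true →
                (((l.map (cslSeq m a)).flatten).foldl (cslStep m) lc0).contains x = true)
          ∧ (∀ c ∈ l,
                (((l.map (cslSeq m a)).flatten).foldl (cslStep m) lc0).contains c = true) := by
        intro l
        induction l with
        | nil =>
          intro _ s lc0 hg0
          exact ⟨rfl, hg0, fun x hx => hx, by simp⟩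
        | cons c t iht =>
          intro hl s lc0 hg0
          obtain ⟨hc1, hg1, hmono1, hcont1⟩ :=
            ih c lc0 (hl c (by simp)).1 (hl c (by simp)).2 hg0
          obtain ⟨hc2, hg2, hmono2, hcont2⟩ :=
            iht (fun d hd => hl d (by simp [hd])) (s + cslCnt m (cslD m) c)
              ((cslSeq m a c).foldl (cslStep m) lc0) hg1
          have hfl : (((c :: t).map (cslSeq m a)).flatten).foldl (cslStep m) lc0
              = ((t.map (cslSeq m a)).flatten).foldl (cslStep m)
                  ((cslSeq m a c).foldl (cslStep m) lc0) := by
            simp [List.foldl_append]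
          refine ⟨?_, ?_, ?_, ?_⟩
          · simp only [List.foldl_cons, hc1]
            rw [hfl]
            exact hc2
          · rw [hfl]; exact hg2
          · intro x hx; rw [hfl]; exact hmono2 x (hmono1 x hx)
          · intro d hd
            rw [hfl]
            rcases List.mem_cons.mp hd with rfl | hdt
            · exact hmono2 d hcont1
            · exact hcont2 d hdt
      obtain ⟨hcEq, hgN, hmonoN, hcontN⟩ := inner (cslG m n) hmuc 0 lc hg
      have hseq : (cslSeq m (a + 1) n).foldl (cslStep m) lc
          = cslStep m (((cslG m n).map (cslSeq m a)).flatten.foldl (cslStep m) lc) n := by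
        simp only [cslSeq, List.foldl_append, List.foldl_cons, List.foldl_nil]
      set lcN := ((cslG m n).map (cslSeq m a)).flatten.foldl (cslStep m) lc with hlcN
      have hgetD : ∀ c ∈ cslG m n, lcN.getD c 0 = cslCnt m (cslD m) c := by
        intro c hc
        have hcont := hcontN c hc
        rw [PySem.Dict.contains_eq_isSome_get?] at hcont
        cases hgc : lcN.get? c with
        | none => rw [hgc] at hcont; simp at hcont
        | some v =>
          rw [PySem.Dict.getD_eq_get?_getD, hgc, Option.getD_some]
          exact hgN c v hgc
      have hVA : (cslG m n).foldl (fun a' c => a' + lcN.getD c 0) 0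
          = (cslG m n).foldl (fun acc c => acc + cslCnt m (cslD m) c) 0 := by
        apply PySem.List.foldl_congr_mem
        intro acc c hc
        rw [hgetD c hc]
      have hcntn : cslCnt m (cslD m) n
          = (cslG m n).foldl (fun acc c => acc + cslCnt m (cslD m) c) 0 := by
        show cslCnt m (m.length + 1) n = _
        simp only [cslCnt, hcs, ite_false]
        apply PySem.List.foldl_congr_mem
        intro acc c hc
        have h1 : cslMu m c < cslMu m n := cslMu_child m habs hn hc
        have h2 : cslMu m n ≤ m.length := cslMu_le m n
        rw [cslCnt_stab m habs m.length (cslD m) c (cslRT_child m hn hc) (by omega)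
          (by simp [cslD]; omega)]
      have hstep : cslStep m lcN n
          = lcN.insert n ((cslG m n).foldl (fun acc c => acc + cslCnt m (cslD m) c) 0) := by
        simp only [cslStep, sorted_children_eq, hcs, ite_false, hVA]
      have hcount : cslCount m (a + 1) n lc
          = ((cslG m n).foldl (fun acc c => acc + cslCnt m (cslD m) c) 0,
             lcN.insert n ((cslG m n).foldl (fun acc c => acc + cslCnt m (cslD m) c) 0)) := by
        show (if cslG m n = [] then _
              else
                let p := (cslG m n).foldl (fun (p : Int × PySem.Dict Int Int) c =>
                  let r := cslCount m a c p.2; (p.1 + r.1, r.2)) (0, lc)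
                (p.1, p.2.insert n p.1)) = _
        rw [if_neg hcs]
        simp only [hcEq]
      refine ⟨?_, ?_, ?_, ?_⟩
      · rw [hcount, hseq, hstep, hcntn]
      · rw [hseq, hstep]
        intro x v hx
        rw [PySem.Dict.get?_insert] at hx
        split at hx
        · rename_i hxn; cases hx; rw [hxn, hcntn]
        · exact hgN x v hx
      · intro x hx
        rw [hseq, hstep, PySem.Dict.contains_insert, hmonoN x hx, Bool.or_true]
      · rw [hseq, hstep, PySem.Dict.contains_insert]; simp

-- ===== VERDICT (by name: the statement is the Claim_ definition above) =====
theorem compute_subtree_leaf_counts_spec : Claim_equal_compute_subtree_leaf_counts := by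
  unfold Claim_equal_compute_subtree_leaf_counts
  intro m root _ hpre
  unfold Spec_compute_subtree_leaf_counts
  by_cases hr : (PySem.Dict.mk m).contains root = false
  · simp [compute_subtree_leaf_counts, compute_subtree_leaf_counts_alt, hr]
  · have hcyc : ∀ p ∈ m, p.1 ∈ cslReach m [root] → p.1 ∉ cslReach m (cslG m p.1) :=
      hpre.resolve_left hr
    -- from Pre_'s computational condition to abstract acyclicity along the reachable part
    have habs : ∀ n c, cslRT m root n → c ∈ cslG m n → ¬ cslRT m c n := by
      intro n c hn hc hcnt
      have hne : cslG m n ≠ [] := by intro h0; rw [h0] at hc; simp at hc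
      have hmem := cslG_mem m n hne
      have hnr : n ∈ cslReach m [root] :=
        cslReach_complete m [root] hn (cslReach_seed m [root] (by simp))
      have hnr2 : n ∈ cslReach m (cslG m n) :=
        cslReach_complete m (cslG m n) hcnt (cslReach_seed m (cslG m n) hc)
      exact hcyc (n, cslG m n) hmem hnr hnr2
    simp only [compute_subtree_leaf_counts, compute_subtree_leaf_counts_alt, hr]
    have horder : cslOrder m (cslFuel m) [root] [] = (cslSeq m (cslD m) root).reverse := by
      rw [cslOrder_eq m habs _ _ _ (by intro x hx; simp at hx; rw [hx]; exact Relation.ReflTransGen.refl) ?_]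
      · simp
      · simp only [List.map_cons, List.map_nil, List.flatten_cons, List.flatten_nil,
          List.append_nil, List.length_reverse]
        calc (cslSeq m (cslD m) root).length
            ≤ (cslL m + 1) ^ cslD m := cslSeq_len m _ root
          _ = cslFuel m := by rw [cslFuel, cslD, cslL]
    rw [horder, List.reverse_reverse]
    have hmu : cslMu m root < cslD m := by
      have := cslMu_le m root
      simp only [cslD]; omega
    have hempty : cslGood m PySem.Dict.empty := by
      intro x v hx
      rw [PySem.Dict.get?_empty] at hx
      cases hx
    have hmain := (cslMain m habs (cslD m) root PySem.Dict.empty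
      Relation.ReflTransGen.refl hmu hempty).1
    show ((cslSeq m (cslD m) root).foldl (cslStep m) PySem.Dict.empty).items
        = (cslCount m (m.length + 1) root PySem.Dict.empty).2.items
    have hD : m.length + 1 = cslD m := rfl
    rw [hD, hmain]
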